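-- pv_equiv track=rewrite | github.com/YinuoWang/competitive_programming | TopCoder/SRM_798_d1/SRM_798_d1_A.py | solve
-- ===== SOURCE A (Python) =====
-- def solve(A, Y):
--     MOD = 10**9+7
--     d = [0 for i in range(Y+1)]
--     d[0] = 1
--     for val in A:
--         new = [d[i]*2 % MOD for i in range(Y+1)]
--         for k in range(Y+1):
--             if k+val <= Y:
--                 new[k+val] += d[k]
--                 new[k+val] %= MOD
--         d = new
--     return d[Y] % MOD
-- ===== SOURCE B (Python) =====
-- def solve(A, Y):
--     MOD = 10**9 + 7
--     # Group equal values with a counter and expand each factor (2 + x^val)^c in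
--     # closed form: its x^(k*val) coefficient is C(c,k)*2^(c-k).  One truncated
--     # Pascal-style row per distinct value, then one convolution into d.
--     cnt = {}
--     for v in A:
--         cnt[v] = cnt.get(v, 0) + 1
--     d = [0] * (Y + 1)
--     d[0] = 1
--     for v, c in cnt.items():
--         K = c if v == 0 else min(c, Y // v)   # largest useful shift count
--         w = [1]                               # w[k] = coeff of x^(k*v) in (2+x^v)^t
--         for _ in range(c):
--             w = [((2 * w[k] if k < len(w) else 0) + (w[k - 1] if k > 0 else 0)) % MOD
--                  for k in range(min(len(w) + 1, K + 1))]
--         d = [sum(w[k] * d[j - k * v] for k in range(len(w)) if k * v <= j) % MOD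
--              for j in range(Y + 1)]
--     return d[Y] % MOD
-- ===== Notes on version B (the rewrite author's own statement) =====
-- stated objective: alternative
-- what changed: Replaces A's per-element doubling-plus-shift DP pass with a counter over distinct values, a closed-form binomial expansion of each factor (2+x^v)^c computed as a truncated Pascal-style row, and one convolution of that row into the table per distinct value.
-- outside the precondition, e.g. on solve([-1], 0): A returns 3, B returns 2
import Mathlib
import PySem

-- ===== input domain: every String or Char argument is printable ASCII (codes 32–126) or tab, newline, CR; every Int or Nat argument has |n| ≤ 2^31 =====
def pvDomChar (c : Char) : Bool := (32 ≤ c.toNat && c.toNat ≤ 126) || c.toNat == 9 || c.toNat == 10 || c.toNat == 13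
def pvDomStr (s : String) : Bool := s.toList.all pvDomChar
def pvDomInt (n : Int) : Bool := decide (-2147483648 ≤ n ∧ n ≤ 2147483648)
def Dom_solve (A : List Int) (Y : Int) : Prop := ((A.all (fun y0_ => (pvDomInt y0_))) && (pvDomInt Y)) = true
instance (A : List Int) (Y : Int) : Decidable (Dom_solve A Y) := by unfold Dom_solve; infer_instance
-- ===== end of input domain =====

-- B replaces A's per-element DP pass by a counter over distinct values, the closed-form
-- binomial row of (2+x^v)^c (truncated Pascal recurrence), and one convolution per
-- distinct value (objective: alternative algorithm, same asymptotic cost).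
-- A's Python list is ported as Array Int; 'if i < 0 then i + size' in PORT A is Python's
-- negative-index rule for new[k+val], exact wherever the Python returns.

-- ===== PORT A =====
def solve (A : List Int) (Y : Int) : Int :=
  let MOD : Int := 10 ^ 9 + 7
  let d0 : Array Int := ((Array.range (Y + 1).toNat).map (fun _ => (0 : Int))).setIfInBounds 0 1
  let d := A.foldl (fun d val =>
    let new := (Array.range (Y + 1).toNat).map (fun i => d.getD i 0 * 2 % MOD)
    (List.range (Y + 1).toNat).foldl (fun new (k : Nat) =>
      if (k : Int) + val ≤ Y then
        new.setIfInBounds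
          (if (k : Int) + val < 0 then (k : Int) + val + (new.size : Int) else (k : Int) + val).toNat
          ((new.getD
            (if (k : Int) + val < 0 then (k : Int) + val + (new.size : Int) else (k : Int) + val).toNat
            0 + d.getD k 0) % MOD)
      else new) new) d0
  d.getD Y.toNat 0 % MOD

-- ===== PORT B =====
def solve_alt (A : List Int) (Y : Int) : Int :=
  let MOD : Int := 10 ^ 9 + 7
  let cnt : PySem.Dict Int Int := A.foldl (fun d v => d.insert v (d.getD v 0 + 1)) PySem.Dict.empty
  let d0 : List Int := PySem.List.pySetD (List.replicate (Y + 1).toNat (0 : Int)) 0 1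
  let d := cnt.items.foldl (fun d p =>
    let v := p.1
    let c := p.2
    let K : Int := if v = 0 then c else min c (PySem.Int.floordiv Y v)
    let w := (PySem.List.pyRange 0 c 1).foldl (fun w _ =>
      (PySem.List.pyRange 0 (min ((w.length : Int) + 1) (K + 1)) 1).map (fun k =>
        ((if k < (w.length : Int) then 2 * PySem.List.pyGetD w k 0 else 0) +
         (if 0 < k then PySem.List.pyGetD w (k - 1) 0 else 0)) % MOD)) [(1 : Int)]
    (PySem.List.pyRange 0 (Y + 1) 1).map (fun j =>
      (((PySem.List.pyRange 0 (w.length : Int) 1).filter (fun k => decide (k * v ≤ j))).map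
        (fun k => PySem.List.pyGetD w k 0 * PySem.List.pyGetD d (j - k * v) 0)).sum % MOD)) d0
  PySem.List.pyGetD d Y 0 % MOD

-- ===== PRECONDITION & SPEC =====
-- Pre_ excludes Y < 0 (both programs raise IndexError on d[0] = 1) and negative values in A,
-- on which A either raises IndexError or returns an accidental negative-index-wraparound
-- value that no specification would pin down (B returns 0 there).
def Pre_solve (A : List Int) (Y : Int) : Prop := 0 ≤ Y ∧ ∀ v ∈ A, 0 ≤ v
instance (A : List Int) (Y : Int) : Decidable (Pre_solve A Y) := by unfold Pre_solve; infer_instance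
def pvWitness_solve : List Int × Int := ([2, 3, 2], 5)

def Spec_solve (A : List Int) (Y : Int) (out : Int) : Prop := out = solve_alt A Y
instance (A : List Int) (Y : Int) (out : Int) : Decidable (Spec_solve A Y out) := by unfold Spec_solve; infer_instance

-- ===== CLAIM (what is proved, stated in full; the proofs are below) =====
def Claim_equal_solve : Prop := ∀ (A : List Int) (Y : Int), Dom_solve A Y → Pre_solve A Y → Spec_solve A Y (solve A Y)

-- ===== LEMMAS AND PROOFS =====

-- Abstract model: one DP step as a transformation of coefficient functions Nat → Int.
def pvFs (M v : Int) (f : Nat → Int) : Nat → Int := fun j =>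
  (2 * f j + (if v ≤ (j : Int) then f ((j : Int) - v).toNat else 0)) % M

-- Exact (un-modded) binomial convolution term and sum: coefficient j after (2+x^v)^c.
def pvT (v : Int) (c : Nat) (f : Nat → Int) (j k : Nat) : Int :=
  if (k : Int) * v ≤ (j : Int) then
    (Nat.choose c k : Int) * 2 ^ (c - k) * f (((j : Int) - (k : Int) * v).toNat) else 0

def pvS (v : Int) (c : Nat) (f : Nat → Int) (j : Nat) : Int :=
  ∑ k ∈ Finset.range (c + 1), pvT v c f j k

theorem pv_emod_self (M x : Int) : (x % M) % M = x % M :=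
  Int.emod_emod_of_dvd x dvd_rfl

theorem pvmod (M a b : Int) (P : Prop) [Decidable P] :
    (2 * (a % M) + (if P then b % M else 0)) % M = (2 * a + (if P then b else 0)) % M := by
  have base : ∀ x : Int, (x % M) ≡ x [ZMOD M] := fun x => pv_emod_self M x
  by_cases hP : P
  · simp only [if_pos hP]
    exact ((base a).mul_left 2).add (base b)
  · simp only [if_neg hP]
    exact ((base a).mul_left 2).add_right 0

-- The model steps for two nonnegative values commute.
theorem pvFs_comm (M v w : Int) (hv : 0 ≤ v) (hw : 0 ≤ w) (f : Nat → Int) :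
    pvFs M v (pvFs M w f) = pvFs M w (pvFs M v f) := by
  funext j
  show (2 * pvFs M w f j + _) % M = (2 * pvFs M v f j + _) % M
  unfold pvFs
  rw [pvmod, pvmod]
  congr 1
  by_cases hvj : v ≤ (j : Int) <;> by_cases hwj : w ≤ (j : Int)
  · by_cases hvw : v + w ≤ (j : Int)
    · simp only [if_pos hvj, if_pos hwj,
          if_pos (show w ≤ ((((j : Int) - v).toNat : Nat) : Int) by omega),
          if_pos (show v ≤ ((((j : Int) - w).toNat : Nat) : Int) by omega),
          show ((((((j : Int) - v).toNat : Nat) : Int) - w).toNat = (((((j : Int) - w).toNat : Nat) : Int) - v).toNat) by omega]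
      ring
    · simp only [if_pos hvj, if_pos hwj,
          if_neg (show ¬ w ≤ ((((j : Int) - v).toNat : Nat) : Int) by omega),
          if_neg (show ¬ v ≤ ((((j : Int) - w).toNat : Nat) : Int) by omega)]
      ring
  · simp only [if_pos hvj, if_neg hwj, if_neg (show ¬ w ≤ ((((j : Int) - v).toNat : Nat) : Int) by omega)]
    ring
  · simp only [if_neg hvj, if_pos hwj, if_neg (show ¬ v ≤ ((((j : Int) - w).toNat : Nat) : Int) by omega)]
    ring
  · simp only [if_neg hvj, if_neg hwj]

-- Folding the model step over a permuted list of nonnegative values gives the same function.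
theorem pvFold_perm (M : Int) {l1 l2 : List Int} (hp : l1.Perm l2) (hnn : ∀ x ∈ l1, 0 ≤ x) :
    ∀ f : Nat → Int, l1.foldl (fun f v => pvFs M v f) f = l2.foldl (fun f v => pvFs M v f) f := by
  induction hp with
  | nil => intro f; rfl
  | cons x _ ih =>
      intro f
      simp only [List.foldl_cons]
      exact ih (fun a ha => hnn a (by simp [ha])) _
  | swap x y l =>
      intro f
      simp only [List.foldl_cons]
      rw [pvFs_comm M x y (hnn x (by simp)) (hnn y (by simp)) f]
  | trans h1 _ ih1 ih2 =>
      intro f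
      rw [ih1 hnn f, ih2 (fun a ha => hnn a (h1.symm.subset ha)) f]

theorem pvFold_replicate (M v : Int) (c : Nat) (f : Nat → Int) :
    (List.replicate c v).foldl (fun f v => pvFs M v f) f = (pvFs M v)^[c] f := by
  induction c generalizing f with
  | zero => rfl
  | succ c ih =>
      rw [List.replicate_succ, List.foldl_cons, ih, Function.iterate_succ_apply]

-- A nodup list of keys, expanded by multiplicity, is a permutation of the original list.
theorem pv_count_flat (a : Int) (g : Int → Nat) :
    ∀ (l : List Int), l.Nodup →
      (l.flatMap (fun k => List.replicate (g k) k)).count a = if a ∈ l then g a else 0 := by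
  intro l
  induction l with
  | nil => simp
  | cons x t ih =>
      intro hnd
      rw [List.flatMap_cons, List.count_append, List.count_replicate,
          ih (List.nodup_cons.mp hnd).2]
      rcases List.nodup_cons.mp hnd with ⟨hx, _⟩
      by_cases hax : a = x
      · subst hax
        simp [hx]
      · simp [hax, Ne.symm hax, List.mem_cons]

theorem pvPerm_flatten (A : List Int) :
    A.Perm ((PySem.Set.ofList A).flatMap (fun k => List.replicate (A.count k) k)) := by
  rw [List.perm_iff_count]
  intro a
  rw [pv_count_flat a (fun k => A.count k) (PySem.Set.ofList A) (PySem.Set.nodup_ofList A)]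
  by_cases ha : a ∈ A
  · rw [if_pos ((PySem.Set.mem_ofList A a).mpr ha)]
  · rw [if_neg (fun hc => ha ((PySem.Set.mem_ofList A a).mp hc)), List.count_eq_zero_of_not_mem ha]

-- Agreement below n is preserved by the model step (nonnegative v only reads lower indices).
theorem pvFs_agree (M v : Int) (hv : 0 ≤ v) {n : Nat} {f g : Nat → Int}
    (h : ∀ i < n, f i = g i) : ∀ j < n, pvFs M v f j = pvFs M v g j := by
  intro j hj
  unfold pvFs
  rw [h j hj]
  by_cases hvj : v ≤ (j : Int)
  · rw [if_pos hvj, if_pos hvj, h (((j : Int) - v).toNat) (by omega)]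
  · rw [if_neg hvj, if_neg hvj]

theorem pvFoldFs_agree (M : Int) {n : Nat} :
    ∀ (l : List Int), (∀ x ∈ l, 0 ≤ x) → ∀ {f g : Nat → Int}, (∀ i < n, f i = g i) →
      ∀ j < n, l.foldl (fun f v => pvFs M v f) f j = l.foldl (fun f v => pvFs M v f) g j := by
  intro l
  induction l with
  | nil => intro _ f g h j hj; exact h j hj
  | cons x t ih =>
      intro hnn f g h j hj
      simp only [List.foldl_cons]
      exact ih (fun a ha => hnn a (by simp [ha]))
        (fun i hi => pvFs_agree M x (hnn x (by simp)) h i hi) j hj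


-- ===== A-side: array lemmas and pointwise characterisation =====

-- A's inner update (one item `val`): doubling pass then forward shift pass, on a fresh array.
def pvStepA (M Y val : Int) (d : Array Int) : Array Int :=
  (List.range (Y + 1).toNat).foldl (fun new (k : Nat) =>
      if (k : Int) + val ≤ Y then
        new.setIfInBounds
          (if (k : Int) + val < 0 then (k : Int) + val + (new.size : Int) else (k : Int) + val).toNat
          ((new.getD
            (if (k : Int) + val < 0 then (k : Int) + val + (new.size : Int) else (k : Int) + val).toNat
            0 + d.getD k 0) % M)
      else new)
    ((Array.range (Y + 1).toNat).map (fun i => d.getD i 0 * 2 % M))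

theorem pv_getD_set_self (a : Array Int) (i : Nat) (x : Int) (h : i < a.size) :
    (a.setIfInBounds i x).getD i 0 = x := by
  rw [Array.getD_eq_getD_getElem?, Array.getElem?_setIfInBounds]
  simp [h]

theorem pv_getD_set_ne (a : Array Int) (i j : Nat) (x : Int) (h : i ≠ j) :
    (a.setIfInBounds i x).getD j 0 = a.getD j 0 := by
  rw [Array.getD_eq_getD_getElem?, Array.getD_eq_getD_getElem?, Array.getElem?_setIfInBounds]
  simp [h]

theorem pv_getD_range_map (n j : Nat) (f : Nat → Int) (h : j < n) :
    ((Array.range n).map f).getD j 0 = f j := by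
  simp [Array.getD, h]

theorem pv_foldl_size {α : Type} (f : Array Int → α → Array Int)
    (hf : ∀ e a, (f e a).size = e.size) :
    ∀ (l : List α) (e : Array Int), (l.foldl f e).size = e.size := by
  intro l
  induction l with
  | nil => intro e; rfl
  | cons a t ih => intro e; simp [List.foldl_cons, ih, hf]

theorem pvStepA_size (M Y val : Int) (d : Array Int) :
    (pvStepA M Y val d).size = (Y + 1).toNat := by
  unfold pvStepA
  rw [pv_foldl_size]
  · simp
  · intro e k; split <;> simp

-- Invariant of A's forward shift pass over the first m indices.
theorem pvA_invariant (M Y val : Int) (hval : 0 ≤ val) (d : Array Int) :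
    ∀ (m : Nat) (new0 : Array Int), new0.size = (Y + 1).toNat → m ≤ (Y + 1).toNat →
      ∀ (j : Nat), (j : Int) ≤ Y →
    ((List.range m).foldl (fun new (k : Nat) =>
        if (k : Int) + val ≤ Y then
          new.setIfInBounds
            (if (k : Int) + val < 0 then (k : Int) + val + (new.size : Int) else (k : Int) + val).toNat
            ((new.getD
              (if (k : Int) + val < 0 then (k : Int) + val + (new.size : Int) else (k : Int) + val).toNat
              0 + d.getD k 0) % M)
        else new) new0).getD j 0
      = if val ≤ (j : Int) ∧ (j : Int) < (m : Int) + val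
          then (new0.getD j 0 + d.getD ((j : Int) - val).toNat 0) % M
          else new0.getD j 0 := by
  intro m
  induction m with
  | zero =>
      intro new0 _ _ j _
      rw [if_neg (show ¬(val ≤ (j : Int) ∧ (j : Int) < ((0 : Nat) : Int) + val) by omega)]
      simp
  | succ m ih =>
      intro new0 hlen hm j hj
      rw [List.range_succ, List.foldl_append, List.foldl_cons, List.foldl_nil]
      have hprevlen : ((List.range m).foldl (fun new (k : Nat) =>
          if (k : Int) + val ≤ Y then
            new.setIfInBounds
              (if (k : Int) + val < 0 then (k : Int) + val + (new.size : Int) else (k : Int) + val).toNat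
              ((new.getD
                (if (k : Int) + val < 0 then (k : Int) + val + (new.size : Int) else (k : Int) + val).toNat
                0 + d.getD k 0) % M)
          else new) new0).size = (Y + 1).toNat := by
        rw [pv_foldl_size]
        · exact hlen
        · intro e k; split <;> simp
      rw [if_neg (show ¬((m : Int) + val < 0) by omega)]
      by_cases hcond : (m : Int) + val ≤ Y
      · rw [if_pos hcond]
        by_cases hje : j = ((m : Int) + val).toNat
        · subst hje
          rw [pv_getD_set_self _ _ _ (by rw [hprevlen]; omega)]
          have hprev_idx := ih new0 hlen (by omega) (((m : Int) + val).toNat) (by omega)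
          rw [if_neg (show ¬(val ≤ (((((m : Int) + val).toNat) : Nat) : Int) ∧
              (((((m : Int) + val).toNat) : Nat) : Int) < (m : Int) + val) by omega)] at hprev_idx
          rw [hprev_idx]
          rw [if_pos (show val ≤ (((((m : Int) + val).toNat) : Nat) : Int) ∧
              (((((m : Int) + val).toNat) : Nat) : Int) < ((m + 1 : Nat) : Int) + val by
            constructor <;> omega)]
          rw [show (((((((m : Int) + val).toNat) : Nat)) : Int) - val).toNat = m by omega]
        · rw [pv_getD_set_ne _ _ _ _ (fun h => hje h.symm)]
          rw [ih new0 hlen (by omega) j hj]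
          by_cases hc : val ≤ (j : Int) ∧ (j : Int) < (m : Int) + val
          · rw [if_pos hc, if_pos (show val ≤ (j : Int) ∧ (j : Int) < ((m + 1 : Nat) : Int) + val by
              constructor <;> omega)]
          · rw [if_neg hc]
            rw [if_neg (show ¬(val ≤ (j : Int) ∧ (j : Int) < ((m + 1 : Nat) : Int) + val) by
              intro h
              exact hc ⟨h.1, by
                have hne : (j : Int) ≠ (m : Int) + val := by
                  intro he
                  exact hje (by omega)
                omega⟩)]
      · rw [if_neg hcond]
        rw [ih new0 hlen (by omega) j hj]
        by_cases hc : val ≤ (j : Int) ∧ (j : Int) < (m : Int) + val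
        · rw [if_pos hc, if_pos (show val ≤ (j : Int) ∧ (j : Int) < ((m + 1 : Nat) : Int) + val by
            constructor <;> omega)]
        · rw [if_neg hc]
          rw [if_neg (show ¬(val ≤ (j : Int) ∧ (j : Int) < ((m + 1 : Nat) : Int) + val) by
            intro h
            exact hc ⟨h.1, by omega⟩)]

-- A's one-item array step, read below Y+1, is the model step.
theorem pvStepA_getD (M Y val : Int) (hval : 0 ≤ val) (d : Array Int)
    (j : Nat) (hj : j < (Y + 1).toNat) :
    (pvStepA M Y val d).getD j 0 = pvFs M val (fun i => d.getD i 0) j := by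
  have hjY : (j : Int) ≤ Y := by omega
  unfold pvStepA pvFs
  rw [pvA_invariant M Y val hval d ((Y + 1).toNat) _ (by simp) (le_refl _) j hjY]
  by_cases hv : val ≤ (j : Int)
  · rw [if_pos (show val ≤ (j : Int) ∧ (j : Int) < (((Y + 1).toNat : Nat) : Int) + val by
        constructor <;> omega),
      if_pos hv, pv_getD_range_map _ _ _ hj, Int.emod_add_emod, mul_comm (d.getD j 0) 2]
  · rw [if_neg (show ¬(val ≤ (j : Int) ∧ (j : Int) < (((Y + 1).toNat : Nat) : Int) + val) by omega),
      if_neg hv, pv_getD_range_map _ _ _ hj, add_zero, mul_comm (d.getD j 0) 2]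

theorem pvFoldA (M Y : Int) :
    ∀ (l : List Int), (∀ v ∈ l, 0 ≤ v) → ∀ (d : Array Int), d.size = (Y + 1).toNat →
      ∀ j < (Y + 1).toNat,
      (l.foldl (fun d val => pvStepA M Y val d) d).getD j 0
        = (l.foldl (fun f v => pvFs M v f) (fun i => d.getD i 0)) j := by
  intro l
  induction l with
  | nil => intro _ d _ j _; rfl
  | cons v t ih =>
      intro hnn d hd j hj
      simp only [List.foldl_cons]
      rw [ih (fun a ha => hnn a (by simp [ha])) _ (pvStepA_size M Y v d) j hj]
      exact pvFoldFs_agree M t (fun a ha => hnn a (by simp [ha]))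
        (fun i hi => pvStepA_getD M Y v (hnn v (by simp)) d i hi) j hj

theorem pvInitA (Y : Int) (hY : 0 ≤ Y) (i : Nat) :
    ((((Array.range (Y + 1).toNat).map (fun _ => (0 : Int))).setIfInBounds 0 1)).getD i 0
      = if i = 0 then 1 else 0 := by
  by_cases hi : i = 0
  · subst hi
    rw [pv_getD_set_self _ _ _ (by simp; omega), if_pos rfl]
  · rw [pv_getD_set_ne _ _ _ _ (fun h => hi h.symm), if_neg hi]
    by_cases hlt : i < (Y + 1).toNat
    · rw [pv_getD_range_map _ _ _ hlt]
    · simp [Array.getD, hlt]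


-- ===== B-side: Pascal row, convolution, model sums =====

-- B's truncated Pascal-row step (one multiplication of the row by (2+x)).
def pvRowStep (M K : Int) (w : List Int) : List Int :=
  (PySem.List.pyRange 0 (min ((w.length : Int) + 1) (K + 1)) 1).map (fun k =>
    ((if k < (w.length : Int) then 2 * PySem.List.pyGetD w k 0 else 0) +
     (if 0 < k then PySem.List.pyGetD w (k - 1) 0 else 0)) % M)

-- B's convolution of the row into the table.
def pvDstep (M Y v : Int) (w d : List Int) : List Int :=
  (PySem.List.pyRange 0 (Y + 1) 1).map (fun j =>
    (((PySem.List.pyRange 0 (w.length : Int) 1).filter (fun k => decide (k * v ≤ j))).map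
      (fun k => PySem.List.pyGetD w k 0 * PySem.List.pyGetD d (j - k * v) 0)).sum % M)

theorem pvFold_const {α : Type} (g : List Int → List Int) :
    ∀ (l : List α) (w : List Int), l.foldl (fun w _ => g w) w = g^[l.length] w := by
  intro l
  induction l with
  | nil => intro w; rfl
  | cons a t ih =>
      intro w
      rw [List.foldl_cons, ih, List.length_cons, Function.iterate_succ_apply]

theorem pv_sum_if_filter {α : Type} (g : α → Int) (p : α → Bool) :
    ∀ l : List α, ((l.filter p).map g).sum = (l.map (fun x => if p x then g x else 0)).sum := by
  intro l
  induction l with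
  | nil => rfl
  | cons x t ih =>
      rw [List.filter_cons]
      by_cases h : p x = true
      · simp only [h, if_true, List.map_cons, List.sum_cons, ih]
      · simp only [h, Bool.false_eq_true, if_false, ih]
        simp [h]

-- The row after t steps: length min (t+1) (K.toNat+1), entry k ≡ C(t,k)·2^(t-k) mod M.
theorem pvRow_spec (M K : Int) (hK : 0 ≤ K) :
    ∀ t : Nat, ((pvRowStep M K)^[t] [1]).length = min (t + 1) (K.toNat + 1) ∧
      ∀ k : Nat, k < ((pvRowStep M K)^[t] [1]).length →
        PySem.List.pyGetD ((pvRowStep M K)^[t] [1]) (k : Int) 0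
          ≡ (Nat.choose t k : Int) * 2 ^ (t - k) [ZMOD M] := by
  intro t
  induction t with
  | zero =>
      constructor
      · simp only [Function.iterate_zero, id, List.length_singleton]
        omega
      · intro k hk
        simp only [Function.iterate_zero, id, List.length_singleton] at hk
        interval_cases k
        simp
  | succ t ih =>
      obtain ⟨hlen, hent⟩ := ih
      have hmodeq : ∀ x : Int, x % M ≡ x [ZMOD M] := fun x => pv_emod_self M x
      have hlen1 : 1 ≤ ((pvRowStep M K)^[t] [1]).length := by omega
      have hlen' : ((pvRowStep M K)^[t+1] [1]).length = min (t + 1 + 1) (K.toNat + 1) := by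
        rw [Function.iterate_succ_apply']
        show ((PySem.List.pyRange 0 _ 1).map _).length = _
        rw [List.length_map, PySem.List.length_pyRange_one]
        omega
      refine ⟨hlen', ?_⟩
      intro k hk
      rw [hlen'] at hk
      rw [Function.iterate_succ_apply']
      show PySem.List.pyGetD ((PySem.List.pyRange 0 _ 1).map _) _ 0 ≡ _ [ZMOD M]
      rw [PySem.List.pyGetD_map_pyRange_of_nonneg _ _ _ _ (by omega) (by omega)]
      set w := (pvRowStep M K)^[t] [1] with hw
      rcases Nat.eq_zero_or_pos k with hk0 | hkpos
      · subst hk0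
        have hc1 : ((0 : Nat) : Int) < (w.length : Int) := by omega
        have hc2 : ¬ ((0 : Int) < ((0 : Nat) : Int)) := by omega
        rw [if_pos hc1, if_neg hc2]
        refine (hmodeq _).trans ?_
        have h0 := hent 0 (by omega)
        have h2 := (h0.mul_left 2).add_right 0
        refine h2.trans ?_
        rw [show (2 * ((t.choose 0 : Int) * 2 ^ (t - 0)) + 0) = ((t+1).choose 0 : Int) * 2 ^ (t + 1 - 0) by
          simp [Nat.choose_zero_right]; ring]
      · obtain ⟨k', rfl⟩ : ∃ k', k = k' + 1 := ⟨k - 1, by omega⟩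
        have hc2 : (0 : Int) < ((k' + 1 : Nat) : Int) := by push_cast; omega
        rw [if_pos hc2,
          show (((k' + 1 : Nat) : Int) - 1) = ((k' : Nat) : Int) by push_cast; ring]
        by_cases hkl : ((k' + 1 : Nat) : Int) < (w.length : Int)
        · have hkl' : k' + 1 < w.length := by omega
          have hkt : k' + 1 ≤ t := by omega
          rw [if_pos hkl]
          refine (hmodeq _).trans ?_
          have h1 := (hent (k' + 1) hkl').mul_left 2
          have h2 := hent k' (by omega)
          refine (h1.add h2).trans ?_
          have hnat : ((t+1).choose (k'+1)) * 2 ^ (t + 1 - (k'+1))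
              = 2 * (t.choose (k'+1) * 2 ^ (t - (k'+1))) + t.choose k' * 2 ^ (t - k') := by
            have he1 : t - k' = (t - (k'+1)) + 1 := by omega
            have he2 : t + 1 - (k'+1) = (t - (k'+1)) + 1 := by omega
            rw [he1, he2, Nat.choose_succ_succ' t k']
            ring
          rw [show (2 * ((t.choose (k'+1) : Int) * 2 ^ (t - (k'+1))) + (t.choose k' : Int) * 2 ^ (t - k'))
              = (((t+1).choose (k'+1) : Int) * 2 ^ (t + 1 - (k'+1))) by exact_mod_cast congrArg (Nat.cast (R := Int)) hnat.symm]
        · rw [if_neg hkl, zero_add]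
          have hk'' : k' = t := by omega
          refine (hmodeq _).trans ?_
          refine (hent k' (by omega)).trans ?_
          rw [hk'']
          rw [Nat.choose_self, Nat.choose_self, Nat.sub_self, Nat.sub_self]


theorem pvT_top (v : Int) (c : Nat) (f : Nat → Int) (j : Nat) :
    pvT v c f j (c + 1) = 0 := by
  simp [pvT, Nat.choose_succ_self]

-- The binomial sum satisfies the one-step recurrence of multiplying by (2+x^v).
theorem pvS_succ (v : Int) (hv : 0 ≤ v) (c : Nat) (f : Nat → Int) (j : Nat) :
    pvS v (c + 1) f j = 2 * pvS v c f j
      + (if v ≤ (j : Int) then pvS v c f (((j : Int) - v).toNat) else 0) := by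
  have h0 : pvT v (c + 1) f j 0 = 2 * pvT v c f j 0 := by
    unfold pvT
    simp only [Nat.cast_zero, zero_mul]
    rw [if_pos (Int.natCast_nonneg j), if_pos (Int.natCast_nonneg j),
      Nat.choose_zero_right, Nat.choose_zero_right, Nat.sub_zero, Nat.sub_zero, pow_succ]
    ring
  have hstep : ∀ k ∈ Finset.range (c + 1), pvT v (c + 1) f j (k + 1)
      = 2 * pvT v c f j (k + 1)
        + (if ((k : Int) + 1) * v ≤ (j : Int) then
            (Nat.choose c k : Int) * 2 ^ (c - k) * f (((j : Int) - ((k : Int) + 1) * v).toNat) else 0) := by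
    intro k hk
    have hkc : k ≤ c := by
      have := Finset.mem_range.mp hk
      omega
    unfold pvT
    have hcast : (((k + 1 : Nat)) : Int) = (k : Int) + 1 := by push_cast; ring
    rw [hcast]
    by_cases hind : ((k : Int) + 1) * v ≤ (j : Int)
    · rw [if_pos hind, if_pos hind, if_pos hind]
      rcases Nat.lt_or_ge k c with hklt | hke
      · have hnat : ((c + 1).choose (k + 1)) * 2 ^ (c + 1 - (k + 1))
            = 2 * (c.choose (k + 1) * 2 ^ (c - (k + 1))) + c.choose k * 2 ^ (c - k) := by
          have he1 : c - k = (c - (k + 1)) + 1 := by omega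
          have he2 : c + 1 - (k + 1) = (c - (k + 1)) + 1 := by omega
          rw [he1, he2, Nat.choose_succ_succ' c k]
          ring
        have hint : (((c + 1).choose (k + 1) : Int)) * 2 ^ (c + 1 - (k + 1))
            = 2 * ((c.choose (k + 1) : Int) * 2 ^ (c - (k + 1))) + (c.choose k : Int) * 2 ^ (c - k) := by
          exact_mod_cast congrArg (Nat.cast (R := Int)) hnat
        rw [hint]
        ring
      · have hkc' : k = c := by omega
        subst hkc'
        rw [Nat.choose_succ_self, Nat.choose_self, Nat.choose_self, Nat.sub_self,
          show k - (k + 1) = 0 by omega, show k - k = 0 by omega]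
        push_cast
        ring
    · rw [if_neg hind, if_neg hind, if_neg hind]
      ring
  have e1 : (∑ k ∈ Finset.range (c + 1), 2 * pvT v c f j (k + 1)) + 2 * pvT v c f j 0
      = 2 * pvS v c f j := by
    rw [← Finset.mul_sum, ← mul_add, ← Finset.sum_range_succ' (pvT v c f j) (c + 1),
      Finset.sum_range_succ, pvT_top, add_zero]
    rfl
  have e2 : (∑ k ∈ Finset.range (c + 1),
        (if ((k : Int) + 1) * v ≤ (j : Int) then
          (Nat.choose c k : Int) * 2 ^ (c - k) * f (((j : Int) - ((k : Int) + 1) * v).toNat) else 0))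
      = (if v ≤ (j : Int) then pvS v c f (((j : Int) - v).toNat) else 0) := by
    by_cases hvj : v ≤ (j : Int)
    · rw [if_pos hvj]
      unfold pvS
      apply Finset.sum_congr rfl
      intro k _
      unfold pvT
      have hj' : (((((j : Int) - v).toNat) : Nat) : Int) = (j : Int) - v := by omega
      rw [hj']
      refine if_congr ?_ ?_ rfl
      · constructor <;> intro h <;> nlinarith [h]
      · rw [show ((j : Int) - v - (k : Int) * v).toNat = ((j : Int) - ((k : Int) + 1) * v).toNat by
          congr 1; ring]
    · rw [if_neg hvj]
      apply Finset.sum_eq_zero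
      intro k _
      rw [if_neg]
      intro hcon
      have hkv : 0 ≤ (k : Int) * v := mul_nonneg (Int.natCast_nonneg k) hv
      nlinarith [hcon]
  calc pvS v (c + 1) f j
      = (∑ k ∈ Finset.range (c + 1), pvT v (c + 1) f j (k + 1)) + pvT v (c + 1) f j 0 := by
        rw [pvS, Finset.sum_range_succ' (pvT v (c + 1) f j) (c + 1)]
    _ = (∑ k ∈ Finset.range (c + 1), (2 * pvT v c f j (k + 1)
          + (if ((k : Int) + 1) * v ≤ (j : Int) then
              (Nat.choose c k : Int) * 2 ^ (c - k) * f (((j : Int) - ((k : Int) + 1) * v).toNat) else 0)))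
          + 2 * pvT v c f j 0 := by
        rw [Finset.sum_congr rfl hstep, h0]
    _ = ((∑ k ∈ Finset.range (c + 1), 2 * pvT v c f j (k + 1)) + 2 * pvT v c f j 0)
          + (∑ k ∈ Finset.range (c + 1),
            (if ((k : Int) + 1) * v ≤ (j : Int) then
              (Nat.choose c k : Int) * 2 ^ (c - k) * f (((j : Int) - ((k : Int) + 1) * v).toNat) else 0)) := by
        rw [Finset.sum_add_distrib]
        ring
    _ = 2 * pvS v c f j + (if v ≤ (j : Int) then pvS v c f (((j : Int) - v).toNat) else 0) := by
        rw [e1, e2]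

-- Iterating the model step c+1 times is the modded binomial sum.
theorem pvIter_eq_pvS (M v : Int) (hv : 0 ≤ v) :
    ∀ (c : Nat) (f : Nat → Int) (j : Nat), (pvFs M v)^[c + 1] f j = pvS v (c + 1) f j % M := by
  intro c
  induction c with
  | zero =>
      intro f j
      rw [Function.iterate_one]
      show (2 * f j + (if v ≤ (j : Int) then f (((j : Int) - v).toNat) else 0)) % M = _
      rw [pvS, Finset.sum_range_succ, Finset.sum_range_one]
      unfold pvT
      rw [if_pos (show ((0 : Nat) : Int) * v ≤ (j : Int) by simp)]
      congr 1
      rw [show (((1 : Nat) : Int) * v) = v by push_cast; ring,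
        show (((j : Int) - ((0 : Nat) : Int) * v).toNat) = j by push_cast; omega]
      simp only [Nat.choose_zero_right, Nat.choose_self, Nat.sub_zero, Nat.sub_self,
        pow_zero, Nat.cast_one, one_mul, mul_one]
      by_cases hvj : v ≤ (j : Int)
      · rw [if_pos hvj]
        norm_num
      · rw [if_neg hvj]
        norm_num
  | succ c ih =>
      intro f j
      rw [Function.iterate_succ_apply']
      have hrfl : pvFs M v ((pvFs M v)^[c + 1] f) j
          = (2 * ((pvFs M v)^[c + 1] f j)
            + (if v ≤ (j : Int) then ((pvFs M v)^[c + 1] f) (((j : Int) - v).toNat) else 0)) % M := rfl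
      rw [hrfl, ih f j, ih f (((j : Int) - v).toNat), pvmod, ← pvS_succ v hv (c + 1) f j]


-- B's convolution step read at j equals the modded binomial sum.
theorem pvDstep_getD (M Y v : Int) (w d : List Int) (c : Nat) (j : Nat)
    (hj : j < (Y + 1).toNat)
    (hlen : w.length ≤ c + 1)
    (hwk : ∀ k : Nat, k < w.length →
      PySem.List.pyGetD w (k : Int) 0 ≡ (Nat.choose c k : Int) * 2 ^ (c - k) [ZMOD M])
    (hvan : ∀ k : Nat, w.length ≤ k → k ≤ c → ¬((k : Int) * v ≤ (j : Int))) :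
    PySem.List.pyGetD (pvDstep M Y v w d) (j : Int) 0
      = pvS v c (fun i => PySem.List.pyGetD d (i : Int) 0) j % M := by
  unfold pvDstep
  rw [PySem.List.pyGetD_map_pyRange_of_nonneg _ _ _ _ (by omega) (by omega)]
  have h1 : (((PySem.List.pyRange 0 (w.length : Int) 1).filter
        (fun k => decide (k * v ≤ (j : Int)))).map
        (fun k => PySem.List.pyGetD w k 0 * PySem.List.pyGetD d ((j : Int) - k * v) 0)).sum
      = ∑ k ∈ Finset.range w.length,
          (if ((k : Nat) : Int) * v ≤ (j : Int) then
            PySem.List.pyGetD w ((k : Nat) : Int) 0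
              * PySem.List.pyGetD d ((j : Int) - ((k : Nat) : Int) * v) 0 else 0) := by
    rw [PySem.List.pyRange_one, List.filter_map, List.map_map, pv_sum_if_filter]
    simp only [sub_zero, Int.toNat_natCast, Function.comp, zero_add, decide_eq_true_eq]
    rfl
  rw [h1]
  have h2 : ∀ k ∈ Finset.range w.length,
      (if ((k : Nat) : Int) * v ≤ (j : Int) then
        PySem.List.pyGetD w ((k : Nat) : Int) 0
          * PySem.List.pyGetD d ((j : Int) - ((k : Nat) : Int) * v) 0 else 0)
      ≡ pvT v c (fun i => PySem.List.pyGetD d (i : Int) 0) j k [ZMOD M] := by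
    intro k hk
    have hkw : k < w.length := Finset.mem_range.mp hk
    unfold pvT
    by_cases hind : ((k : Nat) : Int) * v ≤ (j : Int)
    · rw [if_pos hind, if_pos hind]
      have harg : ((((j : Int) - (k : Int) * v).toNat : Nat) : Int) = (j : Int) - (k : Int) * v := by
        have h0 : 0 ≤ (j : Int) - (k : Int) * v := by linarith [hind]
        omega
      rw [show (fun i : Nat => PySem.List.pyGetD d (i : Int) 0) (((j : Int) - (k : Int) * v).toNat)
          = PySem.List.pyGetD d ((j : Int) - (k : Int) * v) 0 by simp only [harg]]
      exact (hwk k hkw).mul_right _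
    · rw [if_neg hind, if_neg hind]
  have h3 := Int.ModEq.sum h2
  have h4 : (∑ k ∈ Finset.range w.length, pvT v c (fun i => PySem.List.pyGetD d (i : Int) 0) j k)
      = pvS v c (fun i => PySem.List.pyGetD d (i : Int) 0) j := by
    unfold pvS
    refine Finset.sum_subset (by intro x hx; simp only [Finset.mem_range] at hx ⊢; omega) ?_
    intro k hk1 hk2
    unfold pvT
    rw [if_neg (hvan k (by simp only [Finset.mem_range] at hk2; omega) (by
      have := Finset.mem_range.mp hk1
      omega))]
  exact h3.trans (by rw [h4])

-- One whole group (value v, multiplicity c), read at j, is c iterations of the model step.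
theorem pvGroup_getD (M Y : Int) (hY : 0 ≤ Y) (v c : Int) (hv : 0 ≤ v) (hc : 1 ≤ c)
    (d : List Int) (j : Nat) (hj : j < (Y + 1).toNat) :
    PySem.List.pyGetD
      (pvDstep M Y v
        ((pvRowStep M (if v = 0 then c else min c (PySem.Int.floordiv Y v)))^[c.toNat] [1]) d)
      (j : Int) 0
      = (pvFs M v)^[c.toNat] (fun i => PySem.List.pyGetD d (i : Int) 0) j := by
  set K := if v = 0 then c else min c (PySem.Int.floordiv Y v) with hK
  have hvpos : v ≠ 0 → 0 < v := fun h => by omega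
  have hfd : v ≠ 0 → 0 ≤ PySem.Int.floordiv Y v := by
    intro h
    rw [PySem.Int.floordiv_eq_ediv_of_pos (hvpos h)]
    exact Int.ediv_nonneg hY (by omega)
  have hK0 : 0 ≤ K := by
    rw [hK]
    split
    · omega
    · next h => exact le_min (by omega) (hfd h)
  obtain ⟨hrl, hre⟩ := pvRow_spec M K hK0 c.toNat
  have hvan : ∀ k : Nat, ((pvRowStep M K)^[c.toNat] [1]).length ≤ k → k ≤ c.toNat →
      ¬((k : Int) * v ≤ (j : Int)) := by
    intro k hk1 hk2
    rw [hrl] at hk1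
    have hKlt : K < (k : Int) := by omega
    have hvne : v ≠ 0 := by
      intro h0
      rw [hK, if_pos h0] at hKlt
      omega
    have hKeq : K = c ∨ K = PySem.Int.floordiv Y v := by
      rw [hK, if_neg hvne]
      exact min_choice _ _
    have hfdlt : PySem.Int.floordiv Y v < (k : Int) := by
      rcases hKeq with hmc | hmc <;> omega
    have hylt : Y < (k : Int) * v :=
      (PySem.Int.floordiv_lt_iff_lt_mul (hvpos hvne)).mp hfdlt
    intro hcon
    have hjY : (j : Int) ≤ Y := by omega
    linarith
  rw [pvDstep_getD M Y v _ d c.toNat j hj (by rw [hrl]; omega) hre hvan,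
    show c.toNat = (c.toNat - 1) + 1 by omega, pvIter_eq_pvS M v hv]

-- Iterated model steps preserve agreement below n.
theorem pvIter_agree (M v : Int) (hv : 0 ≤ v) {n : Nat} :
    ∀ (m : Nat) {f g : Nat → Int}, (∀ i < n, f i = g i) →
      ∀ j < n, (pvFs M v)^[m] f j = (pvFs M v)^[m] g j := by
  intro m
  induction m with
  | zero => intro f g h j hj; exact h j hj
  | succ m ih =>
      intro f g h j hj
      rw [Function.iterate_succ_apply, Function.iterate_succ_apply]
      exact ih (fun i hi => pvFs_agree M v hv h i hi) j hj

theorem pvFoldGroups_agree (M : Int) {n : Nat} :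
    ∀ (L : List (Int × Int)), (∀ p ∈ L, 0 ≤ p.1) → ∀ {f g : Nat → Int}, (∀ i < n, f i = g i) →
      ∀ j < n, L.foldl (fun f p => (pvFs M p.1)^[p.2.toNat] f) f j
        = L.foldl (fun f p => (pvFs M p.1)^[p.2.toNat] f) g j := by
  intro L
  induction L with
  | nil => intro _ f g h j hj; exact h j hj
  | cons p t ih =>
      intro hnn f g h j hj
      simp only [List.foldl_cons]
      exact ih (fun q hq => hnn q (by simp [hq]))
        (fun i hi => pvIter_agree M p.1 (hnn p (by simp)) p.2.toNat h i hi) j hj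

-- B's whole loop over the counter items, read below Y+1, is the model group fold.
theorem pvFoldB (M Y : Int) (hY : 0 ≤ Y) :
    ∀ (L : List (Int × Int)), (∀ p ∈ L, 0 ≤ p.1 ∧ 1 ≤ p.2) → ∀ (d : List Int),
      ∀ j, j < (Y + 1).toNat →
      PySem.List.pyGetD (L.foldl (fun d p =>
          pvDstep M Y p.1
            ((pvRowStep M (if p.1 = 0 then p.2 else min p.2 (PySem.Int.floordiv Y p.1)))^[p.2.toNat] [1]) d) d)
        (j : Int) 0
        = L.foldl (fun f p => (pvFs M p.1)^[p.2.toNat] f) (fun i => PySem.List.pyGetD d (i : Int) 0) j := by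
  intro L
  induction L with
  | nil => intro _ d j hj; rfl
  | cons p t ih =>
      intro hL d j hj
      simp only [List.foldl_cons]
      rw [ih (fun q hq => hL q (by simp [hq])) _ j hj]
      exact pvFoldGroups_agree M t (fun q hq => (hL q (by simp [hq])).1)
        (fun i hi => pvGroup_getD M Y hY p.1 p.2 (hL p (by simp)).1 (hL p (by simp)).2 d i hi) j hj

theorem pvFoldGroups_flat (M : Int) :
    ∀ (L : List (Int × Int)) (f : Nat → Int),
      L.foldl (fun f p => (pvFs M p.1)^[p.2.toNat] f) f
        = (L.flatMap (fun p => List.replicate p.2.toNat p.1)).foldl (fun f v => pvFs M v f) f := by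
  intro L
  induction L with
  | nil => intro f; rfl
  | cons p t ih =>
      intro f
      rw [List.flatMap_cons, List.foldl_cons, List.foldl_append, pvFold_replicate, ih]

theorem pv_flatMap_map {α β γ : Type} (f : α → β) (g : β → List γ) :
    ∀ l : List α, (l.map f).flatMap g = l.flatMap (fun x => g (f x)) := by
  intro l
  induction l with
  | nil => rfl
  | cons x t ih => simp [List.flatMap_cons, ih]

theorem pvInitB (Y : Int) (hY : 0 ≤ Y) (i : Nat) :
    PySem.List.pyGetD (PySem.List.pySetD (List.replicate (Y + 1).toNat (0 : Int)) 0 1) (i : Int) 0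
      = if i = 0 then 1 else 0 := by
  rw [PySem.List.pySetD_of_nonneg _ _ (le_refl (0 : Int)), PySem.List.pyGetD_natCast]
  by_cases hi : i = 0
  · subst hi
    rw [if_pos rfl, List.getD_eq_getElem?_getD, List.getElem?_set]
    simp [hY]
  · rw [if_neg hi, List.getD_eq_getElem?_getD, List.getElem?_set]
    simp [Ne.symm hi, List.getElem?_replicate]
    split <;> rfl

-- ===== VERDICT (by name: the statement is the Claim_ definition above) =====
theorem solve_spec : Claim_equal_solve := by
  intro A Y _ hpre
  obtain ⟨hY, hA⟩ := hpre
  show solve A Y = solve_alt A Y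
  have hYlt : Y.toNat < (Y + 1).toNat := by omega
  have hAside : solve A Y
      = (A.foldl (fun f v => pvFs (10 ^ 9 + 7) v f)
          (fun i => if i = 0 then (1 : Int) else 0)) Y.toNat % (10 ^ 9 + 7) := by
    have h1 : solve A Y = (A.foldl (fun d val => pvStepA (10 ^ 9 + 7) Y val d)
        (((Array.range (Y + 1).toNat).map (fun _ => (0 : Int))).setIfInBounds 0 1)).getD Y.toNat 0
        % (10 ^ 9 + 7) := rfl
    rw [h1, pvFoldA (10 ^ 9 + 7) Y A hA _ (by simp) Y.toNat hYlt]
    congr 1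
    exact pvFoldFs_agree (10 ^ 9 + 7) A hA (fun i _ => pvInitA Y hY i) Y.toNat hYlt
  have hBside : solve_alt A Y
      = (A.foldl (fun f v => pvFs (10 ^ 9 + 7) v f)
          (fun i => if i = 0 then (1 : Int) else 0)) Y.toNat % (10 ^ 9 + 7) := by
    have h2 : solve_alt A Y = PySem.List.pyGetD
        ((PySem.Dict.counter A).items.foldl (fun d p =>
          pvDstep (10 ^ 9 + 7) Y p.1
            ((PySem.List.pyRange 0 p.2 1).foldl (fun w _ =>
              pvRowStep (10 ^ 9 + 7) (if p.1 = 0 then p.2 else min p.2 (PySem.Int.floordiv Y p.1)) w)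
              [1]) d)
          (PySem.List.pySetD (List.replicate (Y + 1).toNat (0 : Int)) 0 1)) Y 0
        % (10 ^ 9 + 7) := rfl
    have hfun : (fun (d : List Int) (p : Int × Int) =>
        pvDstep (10 ^ 9 + 7) Y p.1
          ((PySem.List.pyRange 0 p.2 1).foldl (fun w _ =>
            pvRowStep (10 ^ 9 + 7) (if p.1 = 0 then p.2 else min p.2 (PySem.Int.floordiv Y p.1)) w)
            [1]) d)
        = (fun (d : List Int) (p : Int × Int) =>
          pvDstep (10 ^ 9 + 7) Y p.1
            ((pvRowStep (10 ^ 9 + 7) (if p.1 = 0 then p.2 else min p.2 (PySem.Int.floordiv Y p.1)))^[p.2.toNat]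
              [1]) d) := by
      funext d p
      rw [pvFold_const, PySem.List.length_pyRange_one]
      norm_num
    have hLmem : ∀ p ∈ (PySem.Dict.counter A).items, 0 ≤ p.1 ∧ 1 ≤ p.2 := by
      intro p hp
      rw [PySem.Dict.items_counter] at hp
      obtain ⟨k, hk, rfl⟩ := List.mem_map.mp hp
      have hkA : k ∈ A := (PySem.Set.mem_ofList A k).mp hk
      refine ⟨hA k hkA, ?_⟩
      have hcnt : 0 < A.count k := List.count_pos_iff.mpr hkA
      show (1 : Int) ≤ (A.count k : Int)
      exact_mod_cast hcnt
    have hidx : ∀ X : List Int, PySem.List.pyGetD X Y 0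
        = PySem.List.pyGetD X ((Y.toNat : Nat) : Int) 0 := fun X => by
      rw [Int.toNat_of_nonneg hY]
    rw [h2, hfun, hidx,
      pvFoldB (10 ^ 9 + 7) Y hY _ hLmem _ Y.toNat hYlt]
    congr 1
    have e1 : ((PySem.Dict.counter A).items).foldl (fun f p => (pvFs (10 ^ 9 + 7) p.1)^[p.2.toNat] f)
          (fun i => PySem.List.pyGetD (PySem.List.pySetD (List.replicate (Y + 1).toNat (0 : Int)) 0 1) (i : Int) 0) Y.toNat
        = ((PySem.Dict.counter A).items).foldl (fun f p => (pvFs (10 ^ 9 + 7) p.1)^[p.2.toNat] f)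
          (fun i => if i = 0 then (1 : Int) else 0) Y.toNat :=
      pvFoldGroups_agree (10 ^ 9 + 7) _ (fun q hq => (hLmem q hq).1)
        (fun i _ => pvInitB Y hY i) Y.toNat hYlt
    rw [e1, pvFoldGroups_flat]
    have e2 : ((PySem.Dict.counter A).items).flatMap (fun p => List.replicate p.2.toNat p.1)
        = (PySem.Set.ofList A).flatMap (fun k => List.replicate (A.count k) k) := by
      rw [PySem.Dict.items_counter, pv_flatMap_map]
      simp only [Int.toNat_natCast]
    rw [e2, ← pvFold_perm (10 ^ 9 + 7) (pvPerm_flatten A) hA]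
  rw [hAside, hBside]
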